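-- pv_equiv track=rewrite | github.com/ovlachi/phishing-detector | src/api/threat_intelligence.py | _calculate_threat_level
-- ===== SOURCE A (Python) =====
-- def _calculate_threat_level(threat_types: list) -> str:
--     """Calculate overall threat level based on threat types"""
--     high_severity = ["MALWARE", "SOCIAL_ENGINEERING"]
--     medium_severity = ["UNWANTED_SOFTWARE", "POTENTIALLY_HARMFUL_APPLICATION"]
--
--     for threat in threat_types:
--         if threat in high_severity:
--             return "high"
--
--     for threat in threat_types:
--         if threat in medium_severity:
--             return "medium"
--
--     return "suspicious" if threat_types else "low"
-- ===== SOURCE B (Python) =====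
-- def _calculate_threat_level(threat_types: list) -> str:
--     """Calculate overall threat level based on threat types"""
--     priority = {
--         "MALWARE": 3,
--         "SOCIAL_ENGINEERING": 3,
--         "UNWANTED_SOFTWARE": 2,
--         "POTENTIALLY_HARMFUL_APPLICATION": 2,
--     }
--     best = 0
--     for threat in threat_types:
--         best = max(best, priority.get(threat, 1))
--     return ("low", "suspicious", "medium", "high")[best]
-- ===== Notes on version B (the rewrite author's own statement) =====
-- stated objective: simpler
-- what changed: Replaces A's two separate membership scans plus a final truthiness check with a single pass that tracks the maximum severity as an integer (0..3) via a priority dict and maps it to the label at the end.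
import Mathlib
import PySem

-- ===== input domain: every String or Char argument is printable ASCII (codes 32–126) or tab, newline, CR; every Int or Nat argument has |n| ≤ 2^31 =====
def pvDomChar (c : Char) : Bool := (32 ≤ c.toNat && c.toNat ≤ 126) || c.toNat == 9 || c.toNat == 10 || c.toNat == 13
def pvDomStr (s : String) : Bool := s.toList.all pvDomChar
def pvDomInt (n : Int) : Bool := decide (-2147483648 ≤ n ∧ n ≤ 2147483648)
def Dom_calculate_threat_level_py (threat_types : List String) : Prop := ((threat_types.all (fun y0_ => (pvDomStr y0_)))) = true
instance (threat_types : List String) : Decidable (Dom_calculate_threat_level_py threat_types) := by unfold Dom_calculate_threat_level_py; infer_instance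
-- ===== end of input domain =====

-- B replaces A's two membership scans + truthiness check with one pass tracking the max severity (simpler decomposition; same cost).

-- ===== PORT A =====
-- first loop: 'for threat in threat_types: if threat in high_severity: return "high"'
def pvLoopHigh : List String → Option String
  | [] => none
  | t :: ts => if ["MALWARE", "SOCIAL_ENGINEERING"].contains t then some "high" else pvLoopHigh ts

-- second loop: 'for threat in threat_types: if threat in medium_severity: return "medium"'
def pvLoopMedium : List String → Option String
  | [] => none
  | t :: ts => if ["UNWANTED_SOFTWARE", "POTENTIALLY_HARMFUL_APPLICATION"].contains t then some "medium" else pvLoopMedium ts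

def calculate_threat_level_py (threat_types : List String) : String :=
  match pvLoopHigh threat_types with
  | some r => r
  | none =>
    match pvLoopMedium threat_types with
    | some r => r
    | none => if threat_types ≠ [] then "suspicious" else "low"

-- ===== PORT B =====
def pvPriority : PySem.Dict String Int :=
  PySem.Dict.ofList [("MALWARE", 3), ("SOCIAL_ENGINEERING", 3),
                     ("UNWANTED_SOFTWARE", 2), ("POTENTIALLY_HARMFUL_APPLICATION", 2)]

def calculate_threat_level_py_alt (threat_types : List String) : String :=
  let best := threat_types.foldl (fun b t => max b (pvPriority.getD t 1)) 0
  -- tuple index: best is always in 0..3, so pyGet? returns some and the port is exact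
  (PySem.List.pyGet? ["low", "suspicious", "medium", "high"] best).getD ""

-- ===== PRECONDITION & SPEC =====
def Spec_calculate_threat_level_py (threat_types : List String) (out : String) : Prop := out = calculate_threat_level_py_alt threat_types
instance (threat_types : List String) (out : String) : Decidable (Spec_calculate_threat_level_py threat_types out) := by unfold Spec_calculate_threat_level_py; infer_instance

-- ===== CLAIM (what is proved, stated in full; the proofs are below) =====
def Claim_equal_calculate_threat_level_py : Prop := ∀ (threat_types : List String), Dom_calculate_threat_level_py threat_types → Spec_calculate_threat_level_py threat_types (calculate_threat_level_py threat_types)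

-- ===== LEMMAS AND PROOFS =====

def pvPrio (t : String) : Int := pvPriority.getD t 1

lemma pvPrio_eq (t : String) :
    pvPrio t = if t = "MALWARE" ∨ t = "SOCIAL_ENGINEERING" then 3
               else if t = "UNWANTED_SOFTWARE" ∨ t = "POTENTIALLY_HARMFUL_APPLICATION" then 2
               else 1 := by
  have hp : pvPriority = PySem.Dict.mk [("MALWARE", 3), ("SOCIAL_ENGINEERING", 3),
      ("UNWANTED_SOFTWARE", 2), ("POTENTIALLY_HARMFUL_APPLICATION", 2)] := by decide
  split_ifs with h1 h2
  · rcases h1 with h | h <;> subst h <;> decide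
  · rcases h2 with h | h <;> subst h <;> decide
  · push_neg at h1 h2
    simp [pvPrio, PySem.Dict.getD, hp, PySem.Dict.get?_mk_cons, PySem.Dict.get?,
          Ne.symm h1.1, Ne.symm h1.2, Ne.symm h2.1, Ne.symm h2.2]

lemma pvPrio_pos (t : String) : 1 ≤ pvPrio t := by
  rw [pvPrio_eq]; split_ifs <;> omega

lemma pvPrio_le (t : String) : pvPrio t ≤ 3 := by
  rw [pvPrio_eq]; split_ifs <;> omega

def pvBest (ts : List String) : Int := ts.foldl (fun b t => max b (pvPrio t)) 0

lemma pvBest_shift (ts : List String) (b : Int) (hb : 0 ≤ b) :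
    ts.foldl (fun b t => max b (pvPrio t)) b = max b (pvBest ts) := by
  induction ts generalizing b with
  | nil => simp [pvBest]; omega
  | cons t ts ih =>
    have h1 := pvPrio_pos t
    have := ih (max b (pvPrio t)) (by omega)
    have := ih (max 0 (pvPrio t)) (by omega)
    simp only [List.foldl_cons, pvBest] at *
    omega

lemma pvBest_le (ts : List String) : pvBest ts ≤ 3 := by
  induction ts with
  | nil => simp [pvBest]
  | cons t ts ih =>
    have := pvPrio_le t
    have := pvBest_shift ts (max 0 (pvPrio t)) (by have := pvPrio_pos t; omega)
    simp only [pvBest, List.foldl_cons] at *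
    omega

lemma pvBest_ge (ts : List String) (t : String) (h : t ∈ ts) : pvPrio t ≤ pvBest ts := by
  induction ts with
  | nil => cases h
  | cons u ts ih =>
    have hu := pvPrio_pos u
    have hsh := pvBest_shift ts (max 0 (pvPrio u)) (by omega)
    simp only [pvBest, List.foldl_cons] at *
    rcases List.mem_cons.mp h with h | h
    · subst h; omega
    · have := ih h; omega

lemma pvBest_attained (ts : List String) : pvBest ts = 0 ∨ ∃ t ∈ ts, pvBest ts = pvPrio t := by
  induction ts with
  | nil => left; simp [pvBest]
  | cons t ts ih =>
    have ht := pvPrio_pos t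
    have hsh := pvBest_shift ts (max 0 (pvPrio t)) (by omega)
    simp only [pvBest, List.foldl_cons] at *
    rcases ih with h0 | ⟨u, hu, he⟩
    · right; exact ⟨t, List.mem_cons_self .., by omega⟩
    · by_cases hc : pvPrio u ≤ pvPrio t
      · right; exact ⟨t, List.mem_cons_self .., by omega⟩
      · right; exact ⟨u, List.mem_cons_of_mem _ hu, by omega⟩

lemma pvLoopHigh_none_iff (ts : List String) :
    pvLoopHigh ts = none ↔ ∀ t ∈ ts, ¬(t = "MALWARE" ∨ t = "SOCIAL_ENGINEERING") := by
  induction ts with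
  | nil => simp [pvLoopHigh]
  | cons t ts ih =>
    by_cases hc : t = "MALWARE" ∨ t = "SOCIAL_ENGINEERING"
    · have hct : (["MALWARE", "SOCIAL_ENGINEERING"] : List String).contains t = true := by
        rcases hc with rfl | rfl <;> decide
      simp only [pvLoopHigh, hct, if_true]
      simp only [reduceCtorEq, false_iff]
      exact fun h' => (h' t (List.mem_cons_self ..)) hc
    · have hct : (["MALWARE", "SOCIAL_ENGINEERING"] : List String).contains t = false := by
        simp only [List.contains_eq_mem, List.mem_cons, List.not_mem_nil, or_false,
                   decide_eq_false_iff_not]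
        exact hc
      simp only [pvLoopHigh, hct, Bool.false_eq_true, if_false]
      rw [ih]; constructor
      · intro h' u hu
        rcases List.mem_cons.mp hu with rfl | hu
        · exact hc
        · exact h' u hu
      · intro h' u hu; exact h' u (List.mem_cons_of_mem _ hu)

lemma pvLoopHigh_some (ts : List String) (r : String) (h : pvLoopHigh ts = some r) : r = "high" := by
  induction ts with
  | nil => simp [pvLoopHigh] at h
  | cons t ts ih =>
    simp only [pvLoopHigh] at h
    split_ifs at h with hc
    · exact (Option.some_inj.mp h).symm
    · exact ih h

lemma pvLoopMedium_none_iff (ts : List String) :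
    pvLoopMedium ts = none ↔ ∀ t ∈ ts, ¬(t = "UNWANTED_SOFTWARE" ∨ t = "POTENTIALLY_HARMFUL_APPLICATION") := by
  induction ts with
  | nil => simp [pvLoopMedium]
  | cons t ts ih =>
    by_cases hc : t = "UNWANTED_SOFTWARE" ∨ t = "POTENTIALLY_HARMFUL_APPLICATION"
    · have hct : (["UNWANTED_SOFTWARE", "POTENTIALLY_HARMFUL_APPLICATION"] : List String).contains t = true := by
        rcases hc with rfl | rfl <;> decide
      simp only [pvLoopMedium, hct, if_true]
      simp only [reduceCtorEq, false_iff]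
      exact fun h' => (h' t (List.mem_cons_self ..)) hc
    · have hct : (["UNWANTED_SOFTWARE", "POTENTIALLY_HARMFUL_APPLICATION"] : List String).contains t = false := by
        simp only [List.contains_eq_mem, List.mem_cons, List.not_mem_nil, or_false,
                   decide_eq_false_iff_not]
        exact hc
      simp only [pvLoopMedium, hct, Bool.false_eq_true, if_false]
      rw [ih]; constructor
      · intro h' u hu
        rcases List.mem_cons.mp hu with rfl | hu
        · exact hc
        · exact h' u hu
      · intro h' u hu; exact h' u (List.mem_cons_of_mem _ hu)

lemma pvLoopMedium_some (ts : List String) (r : String) (h : pvLoopMedium ts = some r) : r = "medium" := by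
  induction ts with
  | nil => simp [pvLoopMedium] at h
  | cons t ts ih =>
    simp only [pvLoopMedium] at h
    split_ifs at h with hc
    · exact (Option.some_inj.mp h).symm
    · exact ih h

lemma pvLoopHigh_not_none (ts : List String) (h : ¬ pvLoopHigh ts = none) :
    ∃ t ∈ ts, t = "MALWARE" ∨ t = "SOCIAL_ENGINEERING" := by
  by_contra hc
  push_neg at hc
  exact h ((pvLoopHigh_none_iff ts).mpr (by intro t ht; have := hc t ht; tauto))

lemma pvLoopMedium_not_none (ts : List String) (h : ¬ pvLoopMedium ts = none) :
    ∃ t ∈ ts, t = "UNWANTED_SOFTWARE" ∨ t = "POTENTIALLY_HARMFUL_APPLICATION" := by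
  by_contra hc
  push_neg at hc
  exact h ((pvLoopMedium_none_iff ts).mpr (by intro t ht; have := hc t ht; tauto))

lemma alt_eq_label (ts : List String) :
    calculate_threat_level_py_alt ts =
      (PySem.List.pyGet? ["low", "suspicious", "medium", "high"] (pvBest ts)).getD "" := rfl

lemma pvBest_of_high (ts : List String) (t : String) (ht : t ∈ ts)
    (h : t = "MALWARE" ∨ t = "SOCIAL_ENGINEERING") : pvBest ts = 3 := by
  have h1 := pvBest_ge ts t ht
  have h2 := pvBest_le ts
  rw [pvPrio_eq] at h1
  simp only [if_pos h] at h1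
  omega

-- ===== VERDICT (by name: the statement is the Claim_ definition above) =====
theorem calculate_threat_level_py_spec : Claim_equal_calculate_threat_level_py := by
  intro ts _
  show calculate_threat_level_py ts = calculate_threat_level_py_alt ts
  rw [alt_eq_label]
  unfold calculate_threat_level_py
  by_cases hH : pvLoopHigh ts = none
  · rw [hH]
    have hHn := (pvLoopHigh_none_iff ts).mp hH
    by_cases hM : pvLoopMedium ts = none
    · rw [hM]
      have hMn := (pvLoopMedium_none_iff ts).mp hM
      cases ts with
      | nil => simp [pvBest, PySem.List.pyGet?, PySem.List.pyIdx?]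
      | cons t ts' =>
        -- nonempty, every element has priority 1, so best = 1
        have hb : pvBest (t :: ts') = 1 := by
          have h1 : pvPrio t ≤ pvBest (t :: ts') := pvBest_ge _ t (List.mem_cons_self ..)
          have h2 : 1 ≤ pvPrio t := pvPrio_pos t
          rcases pvBest_attained (t :: ts') with h0 | ⟨u, hu, he⟩
          · omega
          · have := pvPrio_eq u
            rw [if_neg (hHn u hu), if_neg (hMn u hu)] at this
            omega
        rw [hb]; simp [PySem.List.pyGet?, PySem.List.pyIdx?]
    · obtain ⟨r, hr⟩ := Option.ne_none_iff_exists'.mp hM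
      rw [hr]
      obtain ⟨u, hu, hmed⟩ := pvLoopMedium_not_none ts hM
      have hb : pvBest ts = 2 := by
        have h1 := pvBest_ge ts u hu
        rw [pvPrio_eq, if_neg (hHn u hu), if_pos hmed] at h1
        rcases pvBest_attained ts with h0 | ⟨v, hv, he⟩
        · omega
        · have := pvPrio_eq v
          rw [if_neg (hHn v hv)] at this
          split_ifs at this <;> omega
      rw [hb, pvLoopMedium_some ts r hr]
      simp [PySem.List.pyGet?, PySem.List.pyIdx?]
  · obtain ⟨r, hr⟩ := Option.ne_none_iff_exists'.mp hH
    rw [hr]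
    obtain ⟨u, hu, hhigh⟩ := pvLoopHigh_not_none ts hH
    rw [pvBest_of_high ts u hu hhigh, pvLoopHigh_some ts r hr]
    simp [PySem.List.pyGet?, PySem.List.pyIdx?]
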